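-- pv_equiv track=rewrite | github.com/signavio/bpmn2constraints | bpmnsignal/compiler/bpmn_element_compiler.py | put_starting_tokens_in_front
-- ===== SOURCE A (Python) =====
-- def is_start(token):
--     """
--     Checks if object is start.
--     """
--     return token.get("is_start")
--
-- def put_starting_tokens_in_front(parsed_tokens):
--     """
--     Puts tokens marked as 'is_start' in the beginning of sequence.
--     """
--     new_tokens = []
--     starting_tokens = []
--
--     for token in parsed_tokens:
--         if is_start(token):
--             starting_tokens.append(token)
--         else:
--             new_tokens.append(token)
--
--     starting_tokens += new_tokens
--     return starting_tokens
-- ===== SOURCE B (Python) =====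
-- def is_start(token):
--     """
--     Checks if object is start.
--     """
--     return token.get("is_start")
--
-- def put_starting_tokens_in_front(parsed_tokens):
--     """
--     Puts tokens marked as 'is_start' in the beginning of sequence.
--     Single stable sort keyed on start-ness: start tokens (key False) come
--     first, each group keeps its original relative order.
--     """
--     return sorted(parsed_tokens, key=lambda token: not is_start(token))
-- ===== Notes on version B (the rewrite author's own statement) =====
-- stated objective: idiomatic
-- what changed: Replaces the two-bucket partition loop with a single stable sort keyed on not-is_start, relying on sort stability to keep each group's original order.
import Mathlib
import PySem

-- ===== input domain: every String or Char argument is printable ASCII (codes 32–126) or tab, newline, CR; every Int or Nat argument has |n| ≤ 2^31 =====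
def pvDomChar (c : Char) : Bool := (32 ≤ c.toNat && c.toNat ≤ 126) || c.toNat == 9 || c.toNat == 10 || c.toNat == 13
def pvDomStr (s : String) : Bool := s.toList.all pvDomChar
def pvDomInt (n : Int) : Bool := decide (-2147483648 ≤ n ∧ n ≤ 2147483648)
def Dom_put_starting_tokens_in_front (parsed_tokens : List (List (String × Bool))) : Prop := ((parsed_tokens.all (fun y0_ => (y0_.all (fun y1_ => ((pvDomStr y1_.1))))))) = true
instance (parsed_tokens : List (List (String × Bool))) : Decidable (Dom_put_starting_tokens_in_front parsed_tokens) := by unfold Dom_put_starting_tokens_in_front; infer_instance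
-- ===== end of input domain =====

-- B replaces A's two-bucket partition loop by one stable sort keyed on not-is_start (idiomatic, same result).

-- ===== PORT A =====
-- helper is_start: token.get("is_start") — truthy iff the first "is_start" entry holds true
def isStartTok (token : List (String × Bool)) : Bool :=
  (PySem.Dict.get? (PySem.Dict.mk token) "is_start").getD false

def put_starting_tokens_in_front (parsed_tokens : List (List (String × Bool))) : List (List (String × Bool)) :=
  let acc := parsed_tokens.foldl
    (fun (acc : List (List (String × Bool)) × List (List (String × Bool))) token =>
      if isStartTok token then (acc.1 ++ [token], acc.2) else (acc.1, acc.2 ++ [token]))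
    ([], [])
  acc.1 ++ acc.2

-- ===== PORT B =====
def put_starting_tokens_in_front_alt (parsed_tokens : List (List (String × Bool))) : List (List (String × Bool)) :=
  PySem.List.sorted parsed_tokens (fun token => !isStartTok token) false

-- ===== PRECONDITION & SPEC =====
def Spec_put_starting_tokens_in_front (parsed_tokens : List (List (String × Bool))) (out : List (List (String × Bool))) : Prop := out = put_starting_tokens_in_front_alt parsed_tokens
instance (parsed_tokens : List (List (String × Bool))) (out : List (List (String × Bool))) : Decidable (Spec_put_starting_tokens_in_front parsed_tokens out) := by unfold Spec_put_starting_tokens_in_front; infer_instance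

-- ===== CLAIM (what is proved, stated in full; the proofs are below) =====
def Claim_equal_put_starting_tokens_in_front : Prop := ∀ (parsed_tokens : List (List (String × Bool))), Dom_put_starting_tokens_in_front parsed_tokens → Spec_put_starting_tokens_in_front parsed_tokens (put_starting_tokens_in_front parsed_tokens)

-- ===== LEMMAS AND PROOFS =====

-- inserting a true-key element lands at the very end (Bool order: nothing is above true)
theorem insertBy_true_of_key {α : Type} (k : α → Bool) (x : α) (hx : k x = true) :
    ∀ l : List α, PySem.List.insertBy (fun a b => decide (k a < k b)) x l = l ++ [x] := by
  intro l
  induction l with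
  | nil => rfl
  | cons y ys ih =>
    simp only [PySem.List.insertBy, hx]
    cases hy : k y <;> simp [ih]

-- inserting a false-key element into (all-false s ++ all-true n) lands between the blocks
theorem insertBy_false_of_key {α : Type} (k : α → Bool) (x : α) (hx : k x = false) :
    ∀ (s n : List α), (∀ a ∈ s, k a = false) → (∀ a ∈ n, k a = true) →
      PySem.List.insertBy (fun a b => decide (k a < k b)) x (s ++ n) = s ++ x :: n := by
  intro s
  induction s with
  | nil =>
    intro n _ hn
    cases n with
    | nil => rfl
    | cons y ys =>
      have hy : k y = true := hn y (by simp)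
      simp [PySem.List.insertBy, hx, hy]
  | cons a s ih =>
    intro n hs hn
    have ha : k a = false := hs a (by simp)
    simp only [List.cons_append, PySem.List.insertBy, hx, ha]
    simp [ih n (fun b hb => hs b (by simp [hb])) hn]

-- the insertion-sort loop keeps the two key-blocks: loop invariant
theorem sorted_loop_partition {α : Type} (k : α → Bool) :
    ∀ (xs s n : List α), (∀ a ∈ s, k a = false) → (∀ a ∈ n, k a = true) →
      xs.foldl (fun acc x => PySem.List.insertBy (fun a b => decide (k a < k b)) x acc) (s ++ n)
        = (s ++ xs.filter (fun x => !k x)) ++ (n ++ xs.filter (fun x => k x)) := by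
  intro xs
  induction xs with
  | nil => intro s n _ _; simp
  | cons x xs ih =>
    intro s n hs hn
    simp only [List.foldl_cons]
    cases hx : k x with
    | false =>
      rw [insertBy_false_of_key k x hx s n hs hn]
      have hs' : ∀ a ∈ s ++ [x], k a = false := by
        intro a ha
        rcases List.mem_append.1 ha with h | h
        · exact hs a h
        · simp at h; simpa [h] using hx
      have hsx : s ++ x :: n = (s ++ [x]) ++ n := by simp
      rw [hsx, ih (s ++ [x]) n hs' hn]
      simp [hx]
    | true =>
      rw [insertBy_true_of_key k x hx (s ++ n)]
      have hn' : ∀ a ∈ n ++ [x], k a = true := by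
        intro a ha
        rcases List.mem_append.1 ha with h | h
        · exact hn a h
        · simp at h; simpa [h] using hx
      have hnx : (s ++ n) ++ [x] = s ++ (n ++ [x]) := by simp
      rw [hnx, ih s (n ++ [x]) hs hn']
      simp [List.filter_cons, hx]

-- A's accumulator loop is the filter partition
theorem partition_loop (xs : List (List (String × Bool)))
    (s n : List (List (String × Bool))) :
    xs.foldl
      (fun (acc : List (List (String × Bool)) × List (List (String × Bool))) token =>
        if isStartTok token then (acc.1 ++ [token], acc.2) else (acc.1, acc.2 ++ [token]))
      (s, n)
      = (s ++ xs.filter (fun t => isStartTok t), n ++ xs.filter (fun t => !isStartTok t)) := by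
  induction xs generalizing s n with
  | nil => simp
  | cons x xs ih =>
    simp only [List.foldl_cons]
    cases hx : isStartTok x <;> simp [hx, ih]

-- ===== VERDICT (by name: the statement is the Claim_ definition above) =====
theorem put_starting_tokens_in_front_spec : Claim_equal_put_starting_tokens_in_front := by
  intro xs _
  show put_starting_tokens_in_front xs = put_starting_tokens_in_front_alt xs
  unfold put_starting_tokens_in_front put_starting_tokens_in_front_alt PySem.List.sorted
  rw [partition_loop xs [] []]
  have := sorted_loop_partition (fun t => !isStartTok t) xs [] []
      (by simp) (by simp)
  have hif : (if (false : Bool) = true then (fun a b => decide ((!isStartTok b) < !isStartTok a))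
      else fun a b => decide ((!isStartTok a) < !isStartTok b))
      = fun a b => decide ((!isStartTok a) < !isStartTok b) := rfl
  simp only [List.nil_append, hif] at this ⊢
  rw [this]
  simp
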